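-- pv_equiv track=rewrite | github.com/KaiboLiu/CS519-010-ALG | hw4/sol_nbest.py | nbestc
-- ===== SOURCE A (Python) =====
-- import heapq
--
-- mykey = lambda x: (x[0]+x[1], x[1])
--
-- def nbestc(a, b):
--     if len(a) == []:
--         return []
--     sa, sb = sorted(a), sorted(b)
--     l, result = len(a), []
--     h, ifused = [], set()
--
--     heapq.heappush(h, (mykey((sa[0],sb[0])), (0,0)))
--     while len(result) < l:
--         i,j = heapq.heappop(h)[1]
--         result.append((sa[i],sb[j]))
--         if i+1<l and (i+1,j) not in ifused:
--             heapq.heappush(h, (mykey((sa[i+1],sb[j])), (i+1,j)))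
--             ifused.add((i+1,j))
--         if j+1<l and (i,j+1) not in ifused:
--             heapq.heappush(h, (mykey((sa[i],sb[j+1])), (i,j+1)))
--             ifused.add((i,j+1))
--     return result
-- ===== SOURCE B (Python) =====
-- def nbestc(a, b):
--     sa, sb = sorted(a), sorted(b)
--     l = len(a)
--     order = sorted(((i, j) for i in range(l) for j in range(l)),
--                    key=lambda t: (sa[t[0]] + sb[t[1]], sb[t[1]], t[0], t[1]))
--     return [(sa[i], sb[j]) for (i, j) in order[:l]]
-- ===== Notes on version B (the rewrite author's own statement) =====
-- stated objective: simpler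
-- what changed: Replaces the lazy best-first heap expansion over the (i,j) frontier (with a visited set) by a direct enumeration of all index pairs sorted once with the full tie-breaking key (sum, b-value, i, j), taking the first n. Pre_ excludes empty a and len(b) < len(a): there A raises IndexError on most inputs and otherwise returns a value that depends on how far its heap frontier happens to reach into the short b, while B raises IndexError whenever a is nonempty.
-- outside the precondition, e.g. on nbestc([3, 1, 1], [1, 3]): A returns [(1, 1), (1, 1), (3, 1)], B raises IndexError
import Mathlib
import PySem

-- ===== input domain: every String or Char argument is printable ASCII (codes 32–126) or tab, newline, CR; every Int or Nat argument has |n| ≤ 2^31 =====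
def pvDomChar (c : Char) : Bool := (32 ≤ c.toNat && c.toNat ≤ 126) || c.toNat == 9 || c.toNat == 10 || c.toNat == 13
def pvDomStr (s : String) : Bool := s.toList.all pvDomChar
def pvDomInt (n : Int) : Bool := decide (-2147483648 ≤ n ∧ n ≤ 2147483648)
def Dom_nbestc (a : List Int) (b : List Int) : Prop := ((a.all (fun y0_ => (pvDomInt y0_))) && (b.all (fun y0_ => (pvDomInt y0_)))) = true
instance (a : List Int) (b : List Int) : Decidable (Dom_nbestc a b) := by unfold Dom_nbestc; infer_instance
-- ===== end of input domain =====

-- B replaces A's lazy best-first heap expansion of the (i,j) frontier by one full sort of all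
-- index pairs under the complete tie-breaking key (sum, b-value, i, j); objective: simpler.

-- ===== PORT A =====

-- mykey((sa[i],sb[j])) = (sa[i]+sb[j], sb[j]); indices are in range under Pre_, so getD 0 is exact
def keyv (sa sb : List Int) (p : Nat × Nat) : Int × Int :=
  (sa.getD p.1 0 + sb.getD p.2 0, sb.getD p.2 0)

-- Python's `<` on the heap entries ((sum, bval), (i, j)): lexicographic on the four components
def entLt (x y : (Int × Int) × (Nat × Nat)) : Bool :=
  decide (x.1.1 < y.1.1) || (x.1.1 == y.1.1 && (decide (x.1.2 < y.1.2) ||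
    (x.1.2 == y.1.2 && (decide (x.2.1 < y.2.1) || (x.2.1 == y.2.1 && decide (x.2.2 < y.2.2))))))

-- heapq.heappush / heapq.heappop ported as a sorted list (insert in order / pop the head).
-- Exact: the heap is observed only through the sequence of popped minima, `entLt` is Python's
-- total order on the entries, and all entries are distinct (the (i,j) component is unique).
def nloop (sa sb : List Int) (l : Nat) :
    Nat → List ((Int × Int) × (Nat × Nat)) → PySem.Set (Nat × Nat) → List (Int × Int) → List (Int × Int)
  | 0, _, _, result => result
  | n+1, h, used, result =>
    match h with
    | [] => result   -- unreachable under Pre_ (the frontier is never exhausted early)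
    | (_, (i, j)) :: h' =>
      let result' := result ++ [(sa.getD i 0, sb.getD j 0)]
      let st1 := if i+1 < l ∧ (i+1, j) ∉ used
        then (PySem.List.insertBy entLt (keyv sa sb (i+1, j), (i+1, j)) h', PySem.Set.add used (i+1, j))
        else (h', used)
      let st2 := if j+1 < l ∧ (i, j+1) ∉ st1.2
        then (PySem.List.insertBy entLt (keyv sa sb (i, j+1), (i, j+1)) st1.1, PySem.Set.add st1.2 (i, j+1))
        else st1
      nloop sa sb l n st2.1 st2.2 result'

def nbestc (a : List Int) (b : List Int) : List (Int × Int) :=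
  -- Python's `if len(a) == []` compares an int with a list: always False in Python 3 (dead branch)
  let sa := PySem.List.sorted a (fun x => x)
  let sb := PySem.List.sorted b (fun x => x)
  let l := a.length
  -- `while len(result) < l` appends exactly one pair per iteration: exactly l iterations
  nloop sa sb l l [(keyv sa sb (0, 0), (0, 0))] PySem.Set.empty []

-- ===== PORT B =====

-- Python's `<` on the key tuples (sa[i]+sb[j], sb[j], i, j): lexicographic
def pairLt (sa sb : List Int) (p q : Nat × Nat) : Bool :=
  decide (sa.getD p.1 0 + sb.getD p.2 0 < sa.getD q.1 0 + sb.getD q.2 0) ||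
  ((sa.getD p.1 0 + sb.getD p.2 0) == (sa.getD q.1 0 + sb.getD q.2 0) &&
    (decide (sb.getD p.2 0 < sb.getD q.2 0) || ((sb.getD p.2 0) == (sb.getD q.2 0) &&
      (decide (p.1 < q.1) || (p.1 == q.1 && decide (p.2 < q.2))))))

-- the generator ((i, j) for i in range(l) for j in range(l)), in its iteration order
def allPairs (l : Nat) : List (Nat × Nat) :=
  (List.range l).flatMap (fun i => (List.range l).map (fun j => (i, j)))

def nbestc_alt (a : List Int) (b : List Int) : List (Int × Int) :=
  let sa := PySem.List.sorted a (fun x => x)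
  let sb := PySem.List.sorted b (fun x => x)
  let l := a.length
  -- sorted(gen, key=lambda t: (sa[t[0]]+sb[t[1]], sb[t[1]], t[0], t[1])) ported as PySem's stable
  -- insertion sort (PySem.List.insertBy) with Python's lexicographic tuple `<` written out in
  -- pairLt; exact: same stable sort scheme as PySem.List.sorted, whose 2-tuple key sorted2 cannot
  -- express a 4-tuple key
  let order := (allPairs l).foldl (fun acc t => PySem.List.insertBy (pairLt sa sb) t acc) []
  (order.take l).map (fun t => (sa.getD t.1 0, sb.getD t.2 0))

-- ===== PRECONDITION & SPEC =====
-- Pre_ excludes empty a (A raises IndexError at the initial heappush) and len(b) < len(a):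
-- there A raises IndexError on most inputs and on the rest returns a value that depends on
-- how far its heap frontier happens to reach into the short b, while B raises IndexError
-- there whenever a is nonempty (on empty a, B returns []).
def Pre_nbestc (a : List Int) (b : List Int) : Prop := a ≠ [] ∧ a.length ≤ b.length
instance (a : List Int) (b : List Int) : Decidable (Pre_nbestc a b) := by unfold Pre_nbestc; infer_instance
def pvWitness_nbestc : List Int × List Int := ([2, 1], [3, 0])

def Spec_nbestc (a : List Int) (b : List Int) (out : List (Int × Int)) : Prop := out = nbestc_alt a b
instance (a : List Int) (b : List Int) (out : List (Int × Int)) : Decidable (Spec_nbestc a b out) := by unfold Spec_nbestc; infer_instance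

-- ===== CLAIM (what is proved, stated in full; the proofs are below) =====
def Claim_equal_nbestc : Prop := ∀ (a : List Int) (b : List Int), Dom_nbestc a b → Pre_nbestc a b → Spec_nbestc a b (nbestc a b)

-- ===== LEMMAS AND PROOFS =====

-- basic facts about the orders ------------------------------------------------

lemma entLt_ent (sa sb : List Int) (p q : Nat × Nat) :
    entLt (keyv sa sb p, p) (keyv sa sb q, q) = pairLt sa sb p q := by
  simp [entLt, pairLt, keyv]

lemma pairLt_irrefl (sa sb : List Int) (p : Nat × Nat) : pairLt sa sb p p = false := by
  simp [pairLt]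

lemma pairLt_asymm (sa sb : List Int) (p q : Nat × Nat)
    (h : pairLt sa sb p q = true) : pairLt sa sb q p = false := by
  simp only [pairLt, Bool.or_eq_true, Bool.and_eq_true, decide_eq_true_eq, beq_iff_eq,
    Bool.or_eq_false_iff, Bool.and_eq_false_iff, decide_eq_false_iff_not, beq_eq_false_iff_ne] at *
  omega

lemma pairLt_total (sa sb : List Int) (p q : Nat × Nat) (h : p ≠ q) :
    pairLt sa sb p q = true ∨ pairLt sa sb q p = true := by
  have : p.1 ≠ q.1 ∨ p.2 ≠ q.2 := by
    by_contra hc; push Not at hc; exact h (Prod.ext_iff.mpr hc)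
  simp only [pairLt, Bool.or_eq_true, Bool.and_eq_true, decide_eq_true_eq, beq_iff_eq] at *
  omega

lemma pairLt_trans (sa sb : List Int) (p q r : Nat × Nat)
    (h1 : pairLt sa sb p q = true) (h2 : pairLt sa sb q r = true) :
    pairLt sa sb p r = true := by
  simp only [pairLt, Bool.or_eq_true, Bool.and_eq_true, decide_eq_true_eq, beq_iff_eq] at *
  omega

lemma getD_mono {xs : List Int} (hxs : xs.Pairwise (· ≤ ·)) {i j : Nat}
    (hij : i ≤ j) (hj : j < xs.length) : xs.getD i 0 ≤ xs.getD j 0 := by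
  rcases Nat.lt_or_ge i j with h | h
  · rw [List.getD_eq_getElem xs 0 (lt_trans h hj), List.getD_eq_getElem xs 0 hj]
    exact List.pairwise_iff_getElem.mp hxs i j (lt_trans h hj) hj h
  · have : i = j := le_antisymm hij h
    simp [this]

-- componentwise-dominated pairs compare strictly, given sorted sa/sb
lemma pairLt_mono (sa sb : List Int) (hsa : sa.Pairwise (· ≤ ·)) (hsb : sb.Pairwise (· ≤ ·))
    (p q : Nat × Nat) (h1 : p.1 ≤ q.1) (h2 : p.2 ≤ q.2) (hne : p ≠ q)
    (hq1 : q.1 < sa.length) (hq2 : q.2 < sb.length) : pairLt sa sb p q = true := by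
  have ha := getD_mono hsa h1 hq1
  have hb := getD_mono hsb h2 hq2
  have : p.1 ≠ q.1 ∨ p.2 ≠ q.2 := by
    by_contra hc; push Not at hc; exact hne (Prod.ext_iff.mpr hc)
  simp only [pairLt, Bool.or_eq_true, Bool.and_eq_true, decide_eq_true_eq, beq_iff_eq]
  omega

-- allPairs ------------------------------------------------------------------

lemma mem_allPairs (l : Nat) (p : Nat × Nat) : p ∈ allPairs l ↔ p.1 < l ∧ p.2 < l := by
  rcases p with ⟨i, j⟩
  simp [allPairs, List.mem_flatMap]

lemma allPairs_eq_product (l : Nat) : allPairs l = List.range l ×ˢ List.range l := rfl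

lemma nodup_allPairs (l : Nat) : (allPairs l).Nodup := by
  rw [allPairs_eq_product]; exact (List.nodup_range).product List.nodup_range

lemma length_allPairs (l : Nat) : (allPairs l).length = l * l := by
  simp [allPairs, List.length_flatMap]

-- insertBy ------------------------------------------------------------------

lemma insertBy_perm {α : Type} (before : α → α → Bool) (x : α) (ys : List α) :
    (PySem.List.insertBy before x ys).Perm (x :: ys) := by
  induction ys with
  | nil => simp [PySem.List.insertBy]
  | cons y ys ih =>
    simp only [PySem.List.insertBy]
    split
    · exact List.Perm.refl _
    · exact ((ih.cons y).trans (List.Perm.swap x y ys))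

lemma insertBy_sorted {α : Type} (lt : α → α → Bool)
    (htrans : ∀ a b c, lt a b = true → lt b c = true → lt a c = true)
    (htotal : ∀ a b, a ≠ b → lt a b = true ∨ lt b a = true)
    (x : α) (ys : List α) (hx : x ∉ ys) (hys : ys.Pairwise (lt · · = true)) :
    (PySem.List.insertBy lt x ys).Pairwise (lt · · = true) := by
  induction ys with
  | nil => simp [PySem.List.insertBy]
  | cons y ys ih =>
    simp only [PySem.List.insertBy]
    rcases List.pairwise_cons.mp hys with ⟨hy, hys'⟩
    split
    · rename_i hlt
      refine List.pairwise_cons.mpr ⟨?_, hys⟩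
      intro z hz
      rcases List.mem_cons.mp hz with rfl | hz
      · exact hlt
      · exact htrans _ _ _ hlt (hy _ hz)
    · rename_i hnlt
      have hxy : lt y x = true := by
        rcases htotal x y (by intro h; exact hx (h ▸ List.mem_cons_self)) with h | h
        · exact absurd h hnlt
        · exact h
      refine List.pairwise_cons.mpr ⟨?_, ih (by intro h; exact hx (List.mem_cons_of_mem _ h)) hys'⟩
      intro z hz
      rcases List.mem_cons.mp ((insertBy_perm lt x ys).mem_iff.mp hz) with rfl | h
      · exact hxy
      · exact hy _ h

-- the sorted order list S -----------------------------------------------------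

def orderS (sa sb : List Int) (l : Nat) : List (Nat × Nat) :=
  (allPairs l).foldl (fun acc t => PySem.List.insertBy (pairLt sa sb) t acc) []

lemma foldl_insertBy_perm {α : Type} (lt : α → α → Bool) (us : List α) :
    ∀ acc : List α, (us.foldl (fun acc t => PySem.List.insertBy lt t acc) acc).Perm (acc ++ us) := by
  induction us with
  | nil => intro acc; simp
  | cons u us ih =>
    intro acc
    have h2 : (PySem.List.insertBy lt u acc ++ us).Perm (acc ++ u :: us) :=
      ((insertBy_perm lt u acc).append_right us).trans List.perm_middle.symm
    exact (ih (PySem.List.insertBy lt u acc)).trans h2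

lemma foldl_insertBy_sorted {α : Type} (lt : α → α → Bool)
    (htrans : ∀ a b c, lt a b = true → lt b c = true → lt a c = true)
    (htotal : ∀ a b, a ≠ b → lt a b = true ∨ lt b a = true)
    (us : List α) :
    ∀ acc : List α, (acc ++ us).Nodup → acc.Pairwise (lt · · = true) →
      (us.foldl (fun acc t => PySem.List.insertBy lt t acc) acc).Pairwise (lt · · = true) := by
  induction us with
  | nil => intro acc _ hs; simpa using hs
  | cons u us ih =>
    intro acc hnd hs
    have hu : u ∉ acc := by
      intro hmem
      exact (List.disjoint_of_nodup_append hnd) hmem List.mem_cons_self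
    have hnd' : (PySem.List.insertBy lt u acc ++ us).Nodup := by
      refine ((insertBy_perm lt u acc).symm.append_right us).nodup ?_
      have : (acc ++ u :: us).Perm (u :: acc ++ us) := List.perm_middle
      simpa using this.nodup hnd
    exact ih _ hnd' (insertBy_sorted lt htrans htotal u acc hu hs)

lemma orderS_perm (sa sb : List Int) (l : Nat) : (orderS sa sb l).Perm (allPairs l) := by
  simpa using foldl_insertBy_perm (pairLt sa sb) (allPairs l) []

lemma orderS_sorted (sa sb : List Int) (l : Nat) :
    (orderS sa sb l).Pairwise (pairLt sa sb · · = true) := by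
  refine foldl_insertBy_sorted (pairLt sa sb) (pairLt_trans sa sb) (pairLt_total sa sb)
    (allPairs l) [] ?_ ?_ <;> simp [nodup_allPairs]

lemma orderS_nodup (sa sb : List Int) (l : Nat) : (orderS sa sb l).Nodup :=
  (orderS_perm sa sb l).nodup_iff.mpr (nodup_allPairs l)

lemma mem_orderS (sa sb : List Int) (l : Nat) (p : Nat × Nat) :
    p ∈ orderS sa sb l ↔ p.1 < l ∧ p.2 < l := by
  rw [(orderS_perm sa sb l).mem_iff]; exact mem_allPairs l p

lemma length_orderS (sa sb : List Int) (l : Nat) : (orderS sa sb l).length = l * l := by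
  rw [(orderS_perm sa sb l).length_eq, length_allPairs]

-- entry order facts ----------------------------------------------------------

lemma entLt_irrefl (x : (Int × Int) × (Nat × Nat)) : entLt x x = false := by
  simp [entLt]

lemma entLt_trans (a b c : (Int × Int) × (Nat × Nat))
    (h1 : entLt a b = true) (h2 : entLt b c = true) : entLt a c = true := by
  simp only [entLt, Bool.or_eq_true, Bool.and_eq_true, decide_eq_true_eq, beq_iff_eq] at *
  omega

lemma entLt_total (a b : (Int × Int) × (Nat × Nat)) (h : a ≠ b) :
    entLt a b = true ∨ entLt b a = true := by
  rcases a with ⟨⟨s1, b1⟩, ⟨i1, j1⟩⟩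
  rcases b with ⟨⟨s2, b2⟩, ⟨i2, j2⟩⟩
  have hne : s1 ≠ s2 ∨ b1 ≠ b2 ∨ i1 ≠ i2 ∨ j1 ≠ j2 := by
    by_contra hc; push Not at hc
    obtain ⟨e1, e2, e3, e4⟩ := hc
    exact h (by rw [e1, e2, e3, e4])
  simp only [entLt, Bool.or_eq_true, Bool.and_eq_true, decide_eq_true_eq, beq_iff_eq]
  omega

lemma ent_inj {sa sb : List Int} {p q : Nat × Nat}
    (h : ((keyv sa sb p, p) : (Int × Int) × (Nat × Nat)) = (keyv sa sb q, q)) : p = q :=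
  congrArg Prod.snd h

-- positional facts about orderS ----------------------------------------------

lemma lt_length_orderS (sa sb : List Int) {l k : Nat} (hk : k < l) :
    k < (orderS sa sb l).length := by
  rw [length_orderS]
  have : l ≤ l * l := Nat.le_mul_of_pos_left l (by omega)
  omega

lemma orderS_getElem_lt (sa sb : List Int) (l : Nat) {m n : Nat} (hm : m < n)
    (hn : n < (orderS sa sb l).length) :
    pairLt sa sb ((orderS sa sb l)[m]'(by omega)) ((orderS sa sb l)[n]) = true :=
  List.pairwise_iff_getElem.mp (orderS_sorted sa sb l) m n (by omega) hn hm

lemma mem_take_orderS {sa sb : List Int} {l k m : Nat} (hm : m < k)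
    (hmS : m < (orderS sa sb l).length) :
    (orderS sa sb l)[m] ∈ (orderS sa sb l).take k := by
  have h1 : m < ((orderS sa sb l).take k).length := by
    rw [List.length_take]; omega
  have h2 : ((orderS sa sb l).take k)[m]'h1 = (orderS sa sb l)[m] := List.getElem_take
  exact h2 ▸ List.getElem_mem h1

lemma of_mem_take_orderS {sa sb : List Int} {l k : Nat} {p : Nat × Nat}
    (h : p ∈ (orderS sa sb l).take k) :
    ∃ m, ∃ hmS : m < (orderS sa sb l).length, m < k ∧ (orderS sa sb l)[m] = p := by
  obtain ⟨m, hm, heq⟩ := List.mem_iff_getElem.mp h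
  have hmlen : m < (orderS sa sb l).length := by
    have := hm; rw [List.length_take] at this; omega
  have hmk : m < k := by
    have := hm; rw [List.length_take] at this; omega
  refine ⟨m, hmlen, hmk, ?_⟩
  rw [← List.getElem_take (h := hm)]; exact heq

lemma mem_take_of_pairLt {sa sb : List Int} {l k : Nat} {p : Nat × Nat}
    (hkS : k < (orderS sa sb l).length) (hp : p ∈ orderS sa sb l)
    (hlt : pairLt sa sb p ((orderS sa sb l)[k]) = true) :
    p ∈ (orderS sa sb l).take k := by
  obtain ⟨m, hmS, rfl⟩ := List.mem_iff_getElem.mp hp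
  rcases lt_trichotomy m k with h | h | h
  · exact mem_take_orderS h hmS
  · subst h; rw [pairLt_irrefl] at hlt; cases hlt
  · have h1 := orderS_getElem_lt sa sb l h hmS
    have h2 := pairLt_asymm sa sb _ _ h1
    rw [hlt] at h2; cases h2

lemma getElem_not_mem_take_orderS {sa sb : List Int} {l k : Nat}
    (hkS : k < (orderS sa sb l).length) :
    (orderS sa sb l)[k] ∉ (orderS sa sb l).take k := by
  intro hmem
  obtain ⟨m, hmS, hmk, heq⟩ := of_mem_take_orderS hmem
  have := ((orderS_nodup sa sb l).getElem_inj_iff).mp heq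
  omega

lemma not_mem_take_of_getElem_lt {sa sb : List Int} {l k : Nat} {p : Nat × Nat}
    (hkS : k < (orderS sa sb l).length)
    (hlt : pairLt sa sb ((orderS sa sb l)[k]) p = true) :
    p ∉ (orderS sa sb l).take k := by
  intro hmem
  obtain ⟨m, hmS, hmk, rfl⟩ := of_mem_take_orderS hmem
  rcases lt_trichotomy m k with h | h | h
  · have h2 := orderS_getElem_lt sa sb l h hkS
    have h3 := pairLt_trans sa sb _ _ _ hlt h2
    rw [pairLt_irrefl] at h3; cases h3
  · subst h; rw [pairLt_irrefl] at hlt; cases hlt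
  · omega

-- the frontier invariant ------------------------------------------------------

def pushedK (sa sb : List Int) (l k : Nat) (p : Nat × Nat) : Prop :=
  p.1 < l ∧ p.2 < l ∧ (p = (0, 0) ∨
    (0 < p.1 ∧ (p.1 - 1, p.2) ∈ (orderS sa sb l).take k) ∨
    (0 < p.2 ∧ (p.1, p.2 - 1) ∈ (orderS sa sb l).take k))

def frontK (sa sb : List Int) (l k : Nat) (p : Nat × Nat) : Prop :=
  pushedK sa sb l k p ∧ p ∉ (orderS sa sb l).take k

def InvA (sa sb : List Int) (l k : Nat)
    (h : List ((Int × Int) × (Nat × Nat))) (used : PySem.Set (Nat × Nat)) : Prop :=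
  h.Pairwise (entLt · · = true) ∧
  (∀ e, e ∈ h ↔ ∃ p, e = (keyv sa sb p, p) ∧ frontK sa sb l k p) ∧
  (∀ q, q ∈ used ↔ pushedK sa sb l k q ∧ q ≠ (0, 0))

lemma front_getElem {sa sb : List Int} {l k : Nat}
    (hsa : sa.Pairwise (· ≤ ·)) (hsb : sb.Pairwise (· ≤ ·))
    (hla : sa.length = l) (hlb : l ≤ sb.length)
    (hk : k < l) :
    frontK sa sb l k ((orderS sa sb l)[k]'(lt_length_orderS sa sb hk)) := by
  have hkS := lt_length_orderS sa sb (l := l) hk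
  have hpmem : (orderS sa sb l)[k] ∈ orderS sa sb l := List.getElem_mem hkS
  have hb := (mem_orderS sa sb l _).mp hpmem
  refine ⟨⟨hb.1, hb.2, ?_⟩, getElem_not_mem_take_orderS hkS⟩
  set p := (orderS sa sb l)[k] with hp
  by_cases h00 : p = (0, 0)
  · exact Or.inl h00
  · have hcomp : 0 < p.1 ∨ 0 < p.2 := by
      by_contra hc; push Not at hc
      exact h00 (Prod.ext_iff.mpr ⟨by omega, by omega⟩)
    rcases hcomp with hpos | hpos
    · refine Or.inr (Or.inl ⟨hpos, ?_⟩)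
      refine mem_take_of_pairLt hkS
        ((mem_orderS sa sb l _).mpr ⟨by simp only; omega, by simp only; exact hb.2⟩) ?_
      exact pairLt_mono sa sb hsa hsb (p.1 - 1, p.2) p (by simp only; omega) (by simp only; omega)
        (by intro hc; have := congrArg Prod.fst hc; simp only at this; omega)
        (by omega) (by omega)
    · refine Or.inr (Or.inr ⟨hpos, ?_⟩)
      refine mem_take_of_pairLt hkS
        ((mem_orderS sa sb l _).mpr ⟨by simp only; exact hb.1, by simp only; omega⟩) ?_
      exact pairLt_mono sa sb hsa hsb (p.1, p.2 - 1) p (by simp only; omega) (by simp only; omega)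
        (by intro hc; have := congrArg Prod.snd hc; simp only at this; omega)
        (by omega) (by omega)

lemma head_of_inv {sa sb : List Int} {l k : Nat}
    {h : List ((Int × Int) × (Nat × Nat))} {used : PySem.Set (Nat × Nat)}
    (hsa : sa.Pairwise (· ≤ ·)) (hsb : sb.Pairwise (· ≤ ·))
    (hla : sa.length = l) (hlb : l ≤ sb.length)
    (hk : k < l) (hInv : InvA sa sb l k h used) :
    ∃ h', h = (keyv sa sb ((orderS sa sb l)[k]'(lt_length_orderS sa sb hk)),
               (orderS sa sb l)[k]'(lt_length_orderS sa sb hk)) :: h' := by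
  obtain ⟨hsort, hmem, -⟩ := hInv
  have hkS := lt_length_orderS sa sb (l := l) hk
  have hfr := front_getElem hsa hsb hla hlb hk
  have hc : (keyv sa sb ((orderS sa sb l)[k]), (orderS sa sb l)[k]) ∈ h :=
    (hmem _).mpr ⟨(orderS sa sb l)[k], rfl, hfr⟩
  cases h with
  | nil => cases hc
  | cons e h' =>
    obtain ⟨p, rfl, hfp⟩ := (hmem e).mp List.mem_cons_self
    rcases List.mem_cons.mp hc with heq | htl
    · exact ⟨h', by rw [ent_inj heq.symm]⟩
    · have hlt := (List.pairwise_cons.mp hsort).1 _ htl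
      rw [entLt_ent] at hlt
      have hpmem : p ∈ orderS sa sb l :=
        (mem_orderS sa sb l p).mpr ⟨hfp.1.1, hfp.1.2.1⟩
      exact absurd (mem_take_of_pairLt hkS hpmem hlt) hfp.2

lemma fst_not_mem_take {sa sb : List Int} {l k i j : Nat}
    (hsa : sa.Pairwise (· ≤ ·)) (hsb : sb.Pairwise (· ≤ ·))
    (hla : sa.length = l) (hlb : l ≤ sb.length)
    (hk : k < l) (hSk : (orderS sa sb l)[k]'(lt_length_orderS sa sb hk) = (i, j))
    (hil : i + 1 < l) : (i + 1, j) ∉ (orderS sa sb l).take k := by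
  have hkS := lt_length_orderS sa sb (l := l) hk
  have hb := (mem_orderS sa sb l (i, j)).mp (hSk ▸ List.getElem_mem hkS)
  refine not_mem_take_of_getElem_lt hkS ?_
  rw [hSk]
  exact pairLt_mono sa sb hsa hsb (i, j) (i + 1, j) (by simp) (by simp)
    (by intro hc; have := congrArg Prod.fst hc; simp only at this; omega)
    (by omega) (by have := hb.2; simp only at this ⊢; omega)

lemma snd_not_mem_take {sa sb : List Int} {l k i j : Nat}
    (hsa : sa.Pairwise (· ≤ ·)) (hsb : sb.Pairwise (· ≤ ·))
    (hla : sa.length = l) (hlb : l ≤ sb.length)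
    (hk : k < l) (hSk : (orderS sa sb l)[k]'(lt_length_orderS sa sb hk) = (i, j))
    (hjl : j + 1 < l) : (i, j + 1) ∉ (orderS sa sb l).take k := by
  have hkS := lt_length_orderS sa sb (l := l) hk
  have hb := (mem_orderS sa sb l (i, j)).mp (hSk ▸ List.getElem_mem hkS)
  refine not_mem_take_of_getElem_lt hkS ?_
  rw [hSk]
  exact pairLt_mono sa sb hsa hsb (i, j) (i, j + 1) (by simp) (by simp)
    (by intro hc; have := congrArg Prod.snd hc; simp only at this; omega)
    (by have := hb.1; simp only at this ⊢; omega) (by omega)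

-- one conditional heappush, at the level of the represented sets
lemma push_step (sa sb : List Int) (F P : Nat × Nat → Prop)
    (h : List ((Int × Int) × (Nat × Nat))) (used : PySem.Set (Nat × Nat))
    (c : Nat × Nat) (cb : Prop) [Decidable cb]
    (hsort : h.Pairwise (entLt · · = true))
    (hmem : ∀ e, e ∈ h ↔ ∃ p, e = (keyv sa sb p, p) ∧ F p)
    (hused : ∀ q, q ∈ used ↔ P q ∧ q ≠ (0, 0))
    (hFP : ∀ p, F p → P p) (hPF : cb → P c → F c) (hc0 : c ≠ (0, 0)) :
    (if cb ∧ c ∉ used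
      then (PySem.List.insertBy entLt (keyv sa sb c, c) h, PySem.Set.add used c)
      else (h, used)).1.Pairwise (entLt · · = true) ∧
    (∀ e, e ∈ (if cb ∧ c ∉ used
      then (PySem.List.insertBy entLt (keyv sa sb c, c) h, PySem.Set.add used c)
      else (h, used)).1 ↔ ∃ p, e = (keyv sa sb p, p) ∧ (F p ∨ (p = c ∧ cb))) ∧
    (∀ q, q ∈ (if cb ∧ c ∉ used
      then (PySem.List.insertBy entLt (keyv sa sb c, c) h, PySem.Set.add used c)
      else (h, used)).2 ↔ (P q ∨ (q = c ∧ cb)) ∧ q ≠ (0, 0)) := by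
  split_ifs with hg
  · obtain ⟨hcb, hnu⟩ := hg
    have hnP : ¬ P c := fun hP => hnu ((hused c).mpr ⟨hP, hc0⟩)
    have hnF : ¬ F c := fun hF => hnP (hFP _ hF)
    have hnh : ((keyv sa sb c, c) : (Int × Int) × (Nat × Nat)) ∉ h := by
      intro hmem'
      obtain ⟨p, heq, hFp⟩ := (hmem _).mp hmem'
      rw [ent_inj heq] at hnF; exact hnF hFp
    refine ⟨insertBy_sorted entLt entLt_trans entLt_total _ h hnh hsort, ?_, ?_⟩
    · intro e
      rw [PySem.List.mem_insertBy]
      constructor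
      · rintro (rfl | he)
        · exact ⟨c, rfl, Or.inr ⟨rfl, hcb⟩⟩
        · obtain ⟨p, rfl, hFp⟩ := (hmem e).mp he
          exact ⟨p, rfl, Or.inl hFp⟩
      · rintro ⟨p, rfl, hFp | ⟨rfl, -⟩⟩
        · exact Or.inr ((hmem _).mpr ⟨p, rfl, hFp⟩)
        · exact Or.inl rfl
    · intro q
      rw [PySem.Set.mem_add]
      constructor
      · rintro (hq | rfl)
        · obtain ⟨hP, hne⟩ := (hused q).mp hq
          exact ⟨Or.inl hP, hne⟩
        · exact ⟨Or.inr ⟨rfl, hcb⟩, hc0⟩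
      · rintro ⟨hP | ⟨rfl, -⟩, hne⟩
        · exact Or.inl ((hused q).mpr ⟨hP, hne⟩)
        · exact Or.inr rfl
  · by_cases hcb : cb
    · have hcu : c ∈ used := by
        by_contra hnu; exact hg ⟨hcb, hnu⟩
      have hPc : P c := ((hused c).mp hcu).1
      have hFc : F c := hPF hcb hPc
      refine ⟨hsort, ?_, ?_⟩
      · intro e
        rw [hmem e]
        constructor
        · rintro ⟨p, rfl, hFp⟩; exact ⟨p, rfl, Or.inl hFp⟩
        · rintro ⟨p, rfl, hFp | ⟨rfl, -⟩⟩
          · exact ⟨p, rfl, hFp⟩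
          · exact ⟨_, rfl, hFc⟩
      · intro q
        rw [hused q]
        constructor
        · rintro ⟨hP, hne⟩; exact ⟨Or.inl hP, hne⟩
        · rintro ⟨hP | ⟨rfl, -⟩, hne⟩
          · exact ⟨hP, hne⟩
          · exact ⟨hPc, hne⟩
    · refine ⟨hsort, ?_, ?_⟩
      · intro e
        rw [hmem e]
        exact exists_congr fun p => and_congr_right fun _ =>
          ⟨Or.inl, fun hp => hp.resolve_right (fun hc => hcb hc.2)⟩
      · intro q
        rw [hused q]
        exact and_congr_left fun _ =>
          ⟨Or.inl, fun hp => hp.resolve_right (fun hc => hcb hc.2)⟩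

lemma take_succ_orderS {sa sb : List Int} {l k : Nat} (hkS : k < (orderS sa sb l).length) :
    (orderS sa sb l).take (k + 1) = (orderS sa sb l).take k ++ [(orderS sa sb l)[k]] := by
  rw [List.take_succ, List.getElem?_eq_getElem hkS]; rfl

lemma pushed_succ {sa sb : List Int} {l k i j : Nat}
    (hk : k < l) (hSk : (orderS sa sb l)[k]'(lt_length_orderS sa sb hk) = (i, j)) :
    ∀ p, pushedK sa sb l (k + 1) p ↔
      (pushedK sa sb l k p ∨ (p = (i + 1, j) ∧ i + 1 < l) ∨ (p = (i, j + 1) ∧ j + 1 < l)) := by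
  have hkS := lt_length_orderS sa sb (l := l) hk
  have hb := (mem_orderS sa sb l (i, j)).mp (hSk ▸ List.getElem_mem hkS)
  simp only at hb
  rintro ⟨x, y⟩
  simp only [pushedK, take_succ_orderS hkS, hSk, List.mem_append, List.mem_singleton,
    Prod.mk.injEq]
  constructor
  · rintro ⟨hx, hy, h00 | ⟨hpos, hm | ⟨e1, e2⟩⟩ | ⟨hpos, hm | ⟨e1, e2⟩⟩⟩
    · exact Or.inl ⟨hx, hy, Or.inl h00⟩
    · exact Or.inl ⟨hx, hy, Or.inr (Or.inl ⟨hpos, hm⟩)⟩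
    · exact Or.inr (Or.inl ⟨⟨by omega, by omega⟩, by omega⟩)
    · exact Or.inl ⟨hx, hy, Or.inr (Or.inr ⟨hpos, hm⟩)⟩
    · exact Or.inr (Or.inr ⟨⟨by omega, by omega⟩, by omega⟩)
  · rintro (⟨hx, hy, h00 | ⟨hpos, hm⟩ | ⟨hpos, hm⟩⟩ | ⟨⟨e1, e2⟩, hlt⟩ | ⟨⟨e1, e2⟩, hlt⟩)
    · exact ⟨hx, hy, Or.inl h00⟩
    · exact ⟨hx, hy, Or.inr (Or.inl ⟨hpos, Or.inl hm⟩)⟩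
    · exact ⟨hx, hy, Or.inr (Or.inr ⟨hpos, Or.inl hm⟩)⟩
    · exact ⟨by omega, by omega, Or.inr (Or.inl ⟨by omega, Or.inr ⟨by omega, by omega⟩⟩)⟩
    · exact ⟨by omega, by omega, Or.inr (Or.inr ⟨by omega, Or.inr ⟨by omega, by omega⟩⟩)⟩

lemma front_succ {sa sb : List Int} {l k i j : Nat}
    (hsa : sa.Pairwise (· ≤ ·)) (hsb : sb.Pairwise (· ≤ ·))
    (hla : sa.length = l) (hlb : l ≤ sb.length)
    (hk : k < l) (hSk : (orderS sa sb l)[k]'(lt_length_orderS sa sb hk) = (i, j)) :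
    ∀ p, frontK sa sb l (k + 1) p ↔
      (((frontK sa sb l k p ∧ p ≠ (i, j)) ∨ (p = (i + 1, j) ∧ i + 1 < l)) ∨
        (p = (i, j + 1) ∧ j + 1 < l)) := by
  have hkS := lt_length_orderS sa sb (l := l) hk
  intro p
  have hpush := pushed_succ hk hSk p
  have htk : p ∈ (orderS sa sb l).take (k + 1) ↔
      (p ∈ (orderS sa sb l).take k ∨ p = (i, j)) := by
    rw [take_succ_orderS hkS, hSk]; simp
  unfold frontK
  rw [hpush, htk]
  constructor
  · rintro ⟨hA | hB | hC, hnt⟩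
    · exact Or.inl (Or.inl ⟨⟨hA, fun hm => hnt (Or.inl hm)⟩, fun he => hnt (Or.inr he)⟩)
    · exact Or.inl (Or.inr hB)
    · exact Or.inr hC
  · rintro ((⟨⟨hA, hnt⟩, hne⟩ | ⟨rfl, hlt⟩) | ⟨rfl, hlt⟩)
    · exact ⟨Or.inl hA, by rintro (hm | he); exacts [hnt hm, hne he]⟩
    · refine ⟨Or.inr (Or.inl ⟨rfl, hlt⟩), ?_⟩
      rintro (hm | he)
      · exact fst_not_mem_take hsa hsb hla hlb hk hSk hlt hm
      · have := congrArg Prod.fst he; simp only at this; omega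
    · refine ⟨Or.inr (Or.inr ⟨rfl, hlt⟩), ?_⟩
      rintro (hm | he)
      · exact snd_not_mem_take hsa hsb hla hlb hk hSk hlt hm
      · have := congrArg Prod.snd he; simp only at this; omega

-- the loop pops successive elements of orderS ----------------------------------

lemma loop_run (sa sb : List Int) (l : Nat)
    (hsa : sa.Pairwise (· ≤ ·)) (hsb : sb.Pairwise (· ≤ ·))
    (hla : sa.length = l) (hlb : l ≤ sb.length) :
    ∀ (n k : Nat) (h : List ((Int × Int) × (Nat × Nat))) (used : PySem.Set (Nat × Nat))
      (res : List (Int × Int)), k + n = l → InvA sa sb l k h used →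
      nloop sa sb l n h used res =
        res ++ (((orderS sa sb l).take l).drop k).map
          (fun p => (sa.getD p.1 0, sb.getD p.2 0)) := by
  intro n
  induction n with
  | zero =>
    intro k h used res hkn _
    have hk : k = l := by omega
    subst hk
    rw [List.drop_eq_nil_of_le (by rw [List.length_take]; omega)]
    simp [nloop]
  | succ n ih =>
    intro k h used res hkn hInv
    have hk : k < l := by omega
    have hkS := lt_length_orderS sa sb (l := l) hk
    obtain ⟨h', rfl⟩ := head_of_inv hsa hsb hla hlb hk hInv
    obtain ⟨i, j, hSk⟩ : ∃ i j, (orderS sa sb l)[k]'(lt_length_orderS sa sb hk) = (i, j) :=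
      ⟨_, _, rfl⟩
    obtain ⟨hsort, hmem, hused⟩ := hInv
    rw [hSk] at hmem ⊢
    rw [hSk] at hsort
    -- the tail of the heap represents the frontier minus the popped pair
    have hmem' : ∀ e, e ∈ h' ↔
        ∃ p, e = (keyv sa sb p, p) ∧ (frontK sa sb l k p ∧ p ≠ (i, j)) := by
      intro e
      constructor
      · intro he
        obtain ⟨p, rfl, hfp⟩ := (hmem _).mp (List.mem_cons_of_mem _ he)
        refine ⟨p, rfl, hfp, ?_⟩
        rintro rfl
        have := (List.pairwise_cons.mp hsort).1 _ he
        rw [entLt_irrefl] at this; cases this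
      · rintro ⟨p, rfl, hfp, hne⟩
        rcases List.mem_cons.mp ((hmem _).mpr ⟨p, rfl, hfp⟩) with heq | htl
        · exact absurd (ent_inj heq) hne
        · exact htl
    have hsort' : h'.Pairwise (entLt · · = true) := (List.pairwise_cons.mp hsort).2
    have hb := (mem_orderS sa sb l (i, j)).mp (hSk ▸ List.getElem_mem hkS)
    simp only at hb
    -- first conditional push
    have hPF1 : i + 1 < l → pushedK sa sb l k (i + 1, j) →
        (frontK sa sb l k (i + 1, j) ∧ (i + 1, j) ≠ (i, j)) := by
      intro hlt hP
      exact ⟨⟨hP, fst_not_mem_take hsa hsb hla hlb hk hSk hlt⟩,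
        by intro hc; have := congrArg Prod.fst hc; simp only at this; omega⟩
    obtain ⟨hs1, hm1, hu1⟩ := push_step sa sb
      (fun p => frontK sa sb l k p ∧ p ≠ (i, j)) (pushedK sa sb l k)
      h' used (i + 1, j) (i + 1 < l) hsort' hmem' hused
      (fun p hp => hp.1.1) hPF1
      (by intro hc; have := congrArg Prod.fst hc; simp only at this; omega)
    -- second conditional push
    have hPF2 : j + 1 < l →
        (pushedK sa sb l k (i, j + 1) ∨ ((i, j + 1) = (i + 1, j) ∧ i + 1 < l)) →
        ((frontK sa sb l k (i, j + 1) ∧ (i, j + 1) ≠ (i, j)) ∨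
          ((i, j + 1) = (i + 1, j) ∧ i + 1 < l)) := by
      intro hlt hP
      rcases hP with hP | ⟨heq, -⟩
      · exact Or.inl ⟨⟨hP, snd_not_mem_take hsa hsb hla hlb hk hSk hlt⟩,
          by intro hc; have := congrArg Prod.snd hc; simp only at this; omega⟩
      · have := congrArg Prod.fst heq; simp only at this; omega
    obtain ⟨hs2, hm2, hu2⟩ := push_step sa sb
      (fun p => (frontK sa sb l k p ∧ p ≠ (i, j)) ∨ (p = (i + 1, j) ∧ i + 1 < l))
      (fun q => pushedK sa sb l k q ∨ (q = (i + 1, j) ∧ i + 1 < l))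
      _ _ (i, j + 1) (j + 1 < l) hs1 hm1 hu1
      (by rintro p (hp | hp); exacts [Or.inl (hp.1.1), Or.inr hp]) hPF2
      (by intro hc; have := congrArg Prod.snd hc; simp only at this; omega)
    -- the two pushes re-establish the invariant at k+1
    have hInv' : InvA sa sb l (k + 1) _ _ := ⟨hs2,
      fun e => (hm2 e).trans (exists_congr fun p => and_congr_right fun _ =>
        (front_succ hsa hsb hla hlb hk hSk p).symm),
      fun q => (hu2 q).trans (and_congr_left fun _ =>
        or_assoc.trans (pushed_succ hk hSk q).symm)⟩
    have hstep : nloop sa sb l (n + 1) ((keyv sa sb (i, j), (i, j)) :: h') used res =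
        nloop sa sb l n
          (if (j + 1 < l) ∧ (i, j + 1) ∉ ((if (i + 1 < l) ∧ (i + 1, j) ∉ used
              then (PySem.List.insertBy entLt (keyv sa sb (i + 1, j), (i + 1, j)) h',
                    PySem.Set.add used (i + 1, j))
              else (h', used))).2
          then (PySem.List.insertBy entLt (keyv sa sb (i, j + 1), (i, j + 1)) ((if (i + 1 < l) ∧ (i + 1, j) ∉ used
              then (PySem.List.insertBy entLt (keyv sa sb (i + 1, j), (i + 1, j)) h',
                    PySem.Set.add used (i + 1, j))
              else (h', used))).1,
                PySem.Set.add ((if (i + 1 < l) ∧ (i + 1, j) ∉ used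
              then (PySem.List.insertBy entLt (keyv sa sb (i + 1, j), (i + 1, j)) h',
                    PySem.Set.add used (i + 1, j))
              else (h', used))).2 (i, j + 1))
          else (((if (i + 1 < l) ∧ (i + 1, j) ∉ used
              then (PySem.List.insertBy entLt (keyv sa sb (i + 1, j), (i + 1, j)) h',
                    PySem.Set.add used (i + 1, j))
              else (h', used))).1, ((if (i + 1 < l) ∧ (i + 1, j) ∉ used
              then (PySem.List.insertBy entLt (keyv sa sb (i + 1, j), (i + 1, j)) h',
                    PySem.Set.add used (i + 1, j))
              else (h', used))).2)).1
          (if (j + 1 < l) ∧ (i, j + 1) ∉ ((if (i + 1 < l) ∧ (i + 1, j) ∉ used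
              then (PySem.List.insertBy entLt (keyv sa sb (i + 1, j), (i + 1, j)) h',
                    PySem.Set.add used (i + 1, j))
              else (h', used))).2
          then (PySem.List.insertBy entLt (keyv sa sb (i, j + 1), (i, j + 1)) ((if (i + 1 < l) ∧ (i + 1, j) ∉ used
              then (PySem.List.insertBy entLt (keyv sa sb (i + 1, j), (i + 1, j)) h',
                    PySem.Set.add used (i + 1, j))
              else (h', used))).1,
                PySem.Set.add ((if (i + 1 < l) ∧ (i + 1, j) ∉ used
              then (PySem.List.insertBy entLt (keyv sa sb (i + 1, j), (i + 1, j)) h',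
                    PySem.Set.add used (i + 1, j))
              else (h', used))).2 (i, j + 1))
          else (((if (i + 1 < l) ∧ (i + 1, j) ∉ used
              then (PySem.List.insertBy entLt (keyv sa sb (i + 1, j), (i + 1, j)) h',
                    PySem.Set.add used (i + 1, j))
              else (h', used))).1, ((if (i + 1 < l) ∧ (i + 1, j) ∉ used
              then (PySem.List.insertBy entLt (keyv sa sb (i + 1, j), (i + 1, j)) h',
                    PySem.Set.add used (i + 1, j))
              else (h', used))).2)).2
          (res ++ [(sa.getD i 0, sb.getD j 0)]) := rfl
    rw [hstep, ih (k + 1) _ _ _ (by omega) hInv']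
    have hklen : k < ((orderS sa sb l).take l).length := by
      rw [List.length_take]; omega
    have hdrop : ((orderS sa sb l).take l).drop k =
        (i, j) :: ((orderS sa sb l).take l).drop (k + 1) := by
      rw [List.drop_eq_getElem_cons hklen]
      congr 1
      rw [List.getElem_take]; exact hSk
    rw [hdrop]
    simp

-- the initial heap and set represent the k = 0 frontier
lemma frontK_zero {sa sb : List Int} {l : Nat} (hl : 0 < l) (p : Nat × Nat) :
    frontK sa sb l 0 p ↔ p = (0, 0) := by
  unfold frontK pushedK
  simp only [List.take_zero, List.not_mem_nil, and_false, false_and, or_false,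
    not_false_iff, and_true]
  constructor
  · rintro ⟨-, -, h⟩; exact h
  · rintro rfl; exact ⟨hl, hl, rfl⟩

lemma initial_inv (a b : List Int) (hl : 0 < a.length) :
    InvA (PySem.List.sorted a (fun x => x)) (PySem.List.sorted b (fun x => x)) a.length 0
      [(keyv (PySem.List.sorted a (fun x => x)) (PySem.List.sorted b (fun x => x)) (0, 0), (0, 0))]
      PySem.Set.empty := by
  refine ⟨List.pairwise_singleton _ _, ?_, ?_⟩
  · intro e
    rw [List.mem_singleton]
    constructor
    · rintro rfl; exact ⟨(0, 0), rfl, (frontK_zero hl _).mpr rfl⟩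
    · rintro ⟨p, rfl, hf⟩
      rw [(frontK_zero hl p).mp hf]
  · intro q
    constructor
    · intro hq; simp [PySem.Set.empty] at hq
    · rintro ⟨⟨h1, h2, h3⟩, hne⟩
      rcases h3 with h | ⟨-, hm⟩ | ⟨-, hm⟩
      · exact absurd h hne
      · simp at hm
      · simp at hm

-- ===== VERDICT (by name: the statement is the Claim_ definition above) =====
theorem nbestc_spec : Claim_equal_nbestc := by
  intro a b _ hpre
  obtain ⟨hne, hlen⟩ := hpre
  have hl : 0 < a.length := List.length_pos_of_ne_nil hne
  unfold Spec_nbestc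
  show nloop (PySem.List.sorted a (fun x => x)) (PySem.List.sorted b (fun x => x)) a.length
      a.length
      [(keyv (PySem.List.sorted a (fun x => x)) (PySem.List.sorted b (fun x => x)) (0, 0), (0, 0))]
      PySem.Set.empty []
    = ((orderS (PySem.List.sorted a (fun x => x)) (PySem.List.sorted b (fun x => x))
        a.length).take a.length).map
        (fun t => ((PySem.List.sorted a (fun x => x)).getD t.1 0,
                   (PySem.List.sorted b (fun x => x)).getD t.2 0))
  have hsa : (PySem.List.sorted a (fun x => x)).Pairwise (· ≤ ·) := by
    simpa using PySem.List.sorted_pairwise a (fun x => x)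
  have hsb : (PySem.List.sorted b (fun x => x)).Pairwise (· ≤ ·) := by
    simpa using PySem.List.sorted_pairwise b (fun x => x)
  have hla : (PySem.List.sorted a (fun x => x)).length = a.length := by
    simp [PySem.List.length_sorted]
  have hlb : a.length ≤ (PySem.List.sorted b (fun x => x)).length := by
    simp [PySem.List.length_sorted]; exact hlen
  rw [loop_run (PySem.List.sorted a (fun x => x)) (PySem.List.sorted b (fun x => x))
      a.length hsa hsb hla hlb a.length 0 _ _ [] (by omega)
      (initial_inv _ _ hl)]
  simp
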